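-- pv_equiv track=rewrite | github.com/reznov11/deep-proxy | app/proxy/http_handler.py | _normalized_header_list
-- ===== SOURCE A (Python) =====
-- def _normalized_header_list(headers: list[tuple[str, str]]) -> dict[str, str]:
--     """Lowercase keys; duplicate names merged with comma (RFC 7230 style)."""
--     out: dict[str, str] = {}
--     for name, value in headers:
--         lk = name.lower()
--         if lk in out:
--             out[lk] = f"{out[lk]}, {value}"
--         else:
--             out[lk] = value
--     return out
-- ===== SOURCE B (Python) =====
-- def _normalized_header_list(headers: list[tuple[str, str]]) -> dict[str, str]:
--     """Lowercase keys; duplicate names merged with comma (RFC 7230 style).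
--
--     Two-phase: group all values per lowercased name first, then join each
--     group with ', ' — no membership test / conditional concatenation in the loop.
--     """
--     groups: dict[str, list[str]] = {}
--     for name, value in headers:
--         groups.setdefault(name.lower(), []).append(value)
--     return {name: ", ".join(values) for name, values in groups.items()}
-- ===== Notes on version B (the rewrite author's own statement) =====
-- stated objective: idiomatic
-- what changed: Replaces the single-pass conditional-concatenation loop with a two-phase collect-then-join structure: one loop groups values per lowercased name via setdefault/append (no membership branch), then a second pass builds the result by joining each group with ', '.
import Mathlib
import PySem

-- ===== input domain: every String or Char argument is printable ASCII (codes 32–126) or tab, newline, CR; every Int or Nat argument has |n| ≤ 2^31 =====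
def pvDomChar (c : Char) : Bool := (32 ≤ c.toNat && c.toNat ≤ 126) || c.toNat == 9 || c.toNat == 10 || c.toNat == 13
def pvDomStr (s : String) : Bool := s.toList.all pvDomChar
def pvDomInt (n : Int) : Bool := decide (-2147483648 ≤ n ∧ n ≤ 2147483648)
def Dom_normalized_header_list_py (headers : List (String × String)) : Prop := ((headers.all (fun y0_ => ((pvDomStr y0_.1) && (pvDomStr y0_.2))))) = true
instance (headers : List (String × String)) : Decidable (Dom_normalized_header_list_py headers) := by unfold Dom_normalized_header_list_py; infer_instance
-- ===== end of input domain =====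

-- B replaces A's in-loop membership test + conditional concatenation by a two-phase
-- collect-then-join structure (group values per lowercased name, then join with ", ").


-- ===== PORT A =====
-- literal port of A: one dict, conditional concatenation on duplicate keys.
-- (`out[lk]` inside the true branch is ported as `getD lk ""`: `contains` guarantees the key is present, so no KeyError.)
def normalized_header_list_py (headers : List (String × String)) : List (String × String) :=
  (headers.foldl
    (fun out p =>
      let lk := PySem.Str.lower p.1
      if out.contains lk then
        out.insert lk (out.getD lk "" ++ ", " ++ p.2)
      else
        out.insert lk p.2)
    PySem.Dict.empty).items

-- ===== PORT B =====
-- literal port of B: group values per lowercased name (setdefault+append = modify with default []),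
-- then join each group with ", " in a second pass.
def normalized_header_list_py_alt (headers : List (String × String)) : List (String × String) :=
  let groups : PySem.Dict String (List String) :=
    headers.foldl (fun d p => d.modify (PySem.Str.lower p.1) [] (fun vs => vs ++ [p.2])) PySem.Dict.empty
  groups.items.map (fun p => (p.1, PySem.Str.join ", " p.2))

-- ===== PRECONDITION & SPEC =====
def Spec_normalized_header_list_py (headers : List (String × String)) (out : List (String × String)) : Prop := out = normalized_header_list_py_alt headers
instance (headers : List (String × String)) (out : List (String × String)) : Decidable (Spec_normalized_header_list_py headers out) := by unfold Spec_normalized_header_list_py; infer_instance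

-- ===== CLAIM (what is proved, stated in full; the proofs are below) =====
def Claim_equal_normalized_header_list_py : Prop := ∀ (headers : List (String × String)), Dom_normalized_header_list_py headers → Spec_normalized_header_list_py headers (normalized_header_list_py headers)

-- ===== LEMMAS AND PROOFS =====

-- A's accumulation of one key's value, as a function of the option already stored.
def pvJoinExt (o : Option String) (vs : List String) : Option String :=
  vs.foldl (fun a v => some (match a with | some s => s ++ ", " ++ v | none => v)) o

theorem pvJoinExt_some (vs : List String) : ∀ s : String,
    pvJoinExt (some s) vs = some (vs.foldl (fun a v => a ++ ", " ++ v) s) := by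
  induction vs with
  | nil => intro s; rfl
  | cons v t ih => intro s; simpa [pvJoinExt, List.foldl] using ih (s ++ ", " ++ v)

theorem pvChars_join_append_cons (sep a b : List Char) (t : List (List Char)) :
    PySem.Chars.join sep ((a ++ b) :: t) = a ++ PySem.Chars.join sep (b :: t) := by
  cases t with
  | nil => simp [PySem.Chars.join_singleton]
  | cons u t' => simp [PySem.Chars.join_cons_cons, List.append_assoc]

theorem pvJoin_cons (v : String) (t : List String) :
    PySem.Str.join ", " (v :: t) = t.foldl (fun a w => a ++ ", " ++ w) v := by
  induction t generalizing v with
  | nil =>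
    apply String.ext
    simp [PySem.Str.toList_join, PySem.Chars.join_singleton]
  | cons w t' ih =>
    have h : PySem.Str.join ", " ((v ++ ", " ++ w) :: t') = v ++ ", " ++ PySem.Str.join ", " (w :: t') := by
      apply String.ext
      simp only [PySem.Str.toList_join, List.map_cons, String.toList_append]
      simpa [List.append_assoc] using
        pvChars_join_append_cons (", ".toList) (v.toList ++ ", ".toList) w.toList (t'.map String.toList)
    calc PySem.Str.join ", " (v :: w :: t')
        = v ++ ", " ++ PySem.Str.join ", " (w :: t') := by
          apply String.ext
          simp [PySem.Str.toList_join, PySem.Chars.join_cons_cons]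
      _ = PySem.Str.join ", " ((v ++ ", " ++ w) :: t') := (h).symm
      _ = t'.foldl (fun a z => a ++ ", " ++ z) (v ++ ", " ++ w) := ih _
      _ = (w :: t').foldl (fun a z => a ++ ", " ++ z) v := rfl

theorem pvJoinExt_getD (vs : List String) :
    (pvJoinExt none vs).getD "" = PySem.Str.join ", " vs := by
  cases vs with
  | nil => decide
  | cons v t =>
    have h1 : pvJoinExt none (v :: t) = pvJoinExt (some v) t := rfl
    rw [h1, pvJoinExt_some, pvJoin_cons]
    rfl

-- A's loop step over already-lowercased pairs.
def pvStepA (d : PySem.Dict String String) (p : String × String) : PySem.Dict String String :=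
  if d.contains p.1 then d.insert p.1 (d.getD p.1 "" ++ ", " ++ p.2) else d.insert p.1 p.2

theorem pvStepA_eq (d : PySem.Dict String String) (p : String × String) :
    pvStepA d p = d.insert p.1 (if d.contains p.1 then d.getD p.1 "" ++ ", " ++ p.2 else p.2) := by
  unfold pvStepA; split <;> rfl

theorem pvStepA_fun_eq :
    pvStepA = (fun (d : PySem.Dict String String) (p : String × String) =>
      d.insert p.1 (if d.contains p.1 then d.getD p.1 "" ++ ", " ++ p.2 else p.2)) := by
  funext d p; exact pvStepA_eq d p

theorem pvFoldA_get? (l : List (String × String)) : ∀ (d : PySem.Dict String String) (c : String),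
    (l.foldl pvStepA d).get? c
      = pvJoinExt (d.get? c) ((l.filter (fun p => p.1 == c)).map (fun p => p.2)) := by
  induction l with
  | nil => intro d c; rfl
  | cons p t ih =>
    intro d c
    by_cases hpc : p.1 = c
    · subst hpc
      have hstep : (pvStepA d p).get? p.1
          = some (match d.get? p.1 with | some s => s ++ ", " ++ p.2 | none => p.2) := by
        unfold pvStepA
        by_cases hc : d.contains p.1 = true
        · rw [if_pos hc, PySem.Dict.get?_insert_self]
          have : ∃ s, d.get? p.1 = some s := by
            rcases ho : d.get? p.1 with _ | s
            · exfalso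
              have := PySem.Dict.get?_eq_none_iff_contains (d := d) (k := p.1)
              simp [ho, hc] at this
            · exact ⟨s, rfl⟩
          rcases this with ⟨s, hs⟩
          simp [hs, PySem.Dict.getD_eq_get?_getD]
        · rw [if_neg hc, PySem.Dict.get?_insert_self]
          have hn : d.get? p.1 = none := by
            have := PySem.Dict.get?_eq_none_iff_contains (d := d) (k := p.1)
            simp only [Bool.not_eq_true] at hc
            simp [this, hc]
          simp [hn]
      rw [List.foldl_cons, ih (pvStepA d p) p.1, hstep]
      simp [pvJoinExt]
    · have hstep : (pvStepA d p).get? c = d.get? c := by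
        unfold pvStepA
        split <;> exact PySem.Dict.get?_insert_of_ne _ _ (fun h => hpc h.symm)
      rw [List.foldl_cons, ih (pvStepA d p) c, hstep]
      have : (p.1 == c) = false := by simp [hpc]
      simp [this]

theorem normalized_header_list_py_spec : Claim_equal_normalized_header_list_py := by
  intro headers _
  unfold Spec_normalized_header_list_py normalized_header_list_py normalized_header_list_py_alt
  -- fold over the lowercased pairs
  set m : List (String × String) := headers.map (fun p => (PySem.Str.lower p.1, p.2)) with hm
  have hA : (headers.foldl
      (fun out p =>
        let lk := PySem.Str.lower p.1
        if out.contains lk then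
          out.insert lk (out.getD lk "" ++ ", " ++ p.2)
        else
          out.insert lk p.2)
      PySem.Dict.empty) = m.foldl pvStepA PySem.Dict.empty := by
    rw [hm, List.foldl_map]; rfl
  have hB : (headers.foldl
      (fun d p => d.modify (PySem.Str.lower p.1) [] (fun vs => vs ++ [p.2])) PySem.Dict.empty)
      = m.foldl (fun d p => d.modify p.1 [] (fun vs => vs ++ [p.2])) PySem.Dict.empty := by
    rw [hm, List.foldl_map]
  rw [hA, hB]
  clear hA hB
  set dA := m.foldl pvStepA PySem.Dict.empty with hdA
  set dB := m.foldl (fun d p => d.modify p.1 [] (fun vs => vs ++ [p.2])) PySem.Dict.empty with hdB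
  have hndA : dA.keys.Nodup := by
    rw [hdA, pvStepA_fun_eq]
    exact PySem.Dict.nodup_keys_foldl_insert_key m (fun p => p.1) _ _ (by simp)
  have hndB : dB.keys.Nodup := by
    rw [hdB]
    exact PySem.Dict.nodup_keys_foldl_modify_key m (fun p => p.1) [] (fun _ p vs => vs ++ [p.2]) _ (by simp)
  have hkeys : dA.keys = dB.keys := by
    rw [hdA, hdB, pvStepA_fun_eq]
    rw [PySem.Dict.keys_foldl_insert_key m (fun p => p.1) _ _]
    rw [PySem.Dict.keys_foldl_modify_key m (fun p => p.1) [] (fun _ p vs => vs ++ [p.2]) _]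
    simp [PySem.Dict.keys_empty]
  have hval : ∀ c : String, dA.getD c "" = PySem.Str.join ", " (dB.getD c []) := by
    intro c
    have h1 : dA.getD c "" = (pvJoinExt none ((m.filter (fun p => p.1 == c)).map (fun p => p.2))).getD "" := by
      rw [PySem.Dict.getD_eq_get?_getD, hdA, pvFoldA_get? m PySem.Dict.empty c, PySem.Dict.get?_empty]
    have h2 : dB.getD c [] = (m.filter (fun p => p.1 == c)).map (fun p => p.2) := by
      rw [hdB, PySem.Dict.getD_foldl_modify_append m PySem.Dict.empty c, PySem.Dict.getD_empty]
      simp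
    rw [h1, h2, pvJoinExt_getD]
  show dA.items = dB.items.map (fun p => (p.1, PySem.Str.join ", " p.2))
  rw [PySem.Dict.items_eq_map_keys dA hndA "", PySem.Dict.items_eq_map_keys dB hndB [], hkeys]
  rw [List.map_map]
  exact List.map_congr_left (fun k _ => by simp [Function.comp, hval k])
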